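-- pv_equiv track=rewrite | github.com/savior-22/IDMA-MLDA | IDMA-MLDA/models.py | split_class
-- ===== SOURCE A (Python) =====
-- def split_class(class_cnts, many_shot_thr=500):
-- 	many_cls = []
-- 	few_cls = []
-- 	for i, cnt in enumerate(class_cnts):
-- 		if cnt > many_shot_thr:
-- 			many_cls.append((cnt, i))
-- 		else:
-- 			few_cls.append((cnt, i))
-- 	return [x for _, x in sorted(many_cls, reverse=True, key=lambda x: x[0])], [x for _, x in sorted(few_cls, reverse=True, key=lambda x: x[0])]
-- ===== SOURCE B (Python) =====
-- def split_class(class_cnts, many_shot_thr=500):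
--     order = sorted(enumerate(class_cnts), key=lambda p: p[1], reverse=True)
--     return ([i for i, c in order if c > many_shot_thr],
--             [i for i, c in order if c <= many_shot_thr])
-- ===== Notes on version B (the rewrite author's own statement) =====
-- stated objective: simpler
-- what changed: A partitions the enumerated counts into two lists first and then runs two separate stable reverse sorts; B sorts the enumerated list once by count (stable, descending) and obtains both outputs by filtering that single sorted order.
import Mathlib
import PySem

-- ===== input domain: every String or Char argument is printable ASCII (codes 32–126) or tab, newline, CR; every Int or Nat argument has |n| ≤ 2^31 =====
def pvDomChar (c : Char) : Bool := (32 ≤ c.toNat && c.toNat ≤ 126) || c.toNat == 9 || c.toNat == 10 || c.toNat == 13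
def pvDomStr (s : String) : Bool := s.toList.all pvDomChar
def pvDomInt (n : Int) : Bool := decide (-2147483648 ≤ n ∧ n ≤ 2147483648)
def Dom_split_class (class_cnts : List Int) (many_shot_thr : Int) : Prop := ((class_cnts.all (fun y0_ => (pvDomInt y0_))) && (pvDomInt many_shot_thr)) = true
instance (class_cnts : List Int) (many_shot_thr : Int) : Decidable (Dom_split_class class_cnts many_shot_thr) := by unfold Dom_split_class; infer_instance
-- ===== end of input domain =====

-- B replaces A's partition-then-two-sorts structure by one sort of the enumerated list
-- followed by two filters (objective: simpler); same return value on every input.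

-- ===== PORT A =====
def split_class (class_cnts : List Int) (many_shot_thr : Int) : List Int × List Int :=
  -- many_cls = []; few_cls = []; for i, cnt in enumerate(class_cnts): append (cnt, i) to one of them
  let st := (PySem.List.enumerate class_cnts 0).foldl
    (fun (s : List (Int × Int) × List (Int × Int)) p =>
      if p.2 > many_shot_thr then (s.1 ++ [(p.2, p.1)], s.2) else (s.1, s.2 ++ [(p.2, p.1)]))
    ([], [])
  ((PySem.List.sorted st.1 (fun x => x.1) true).map (fun x => x.2),
   (PySem.List.sorted st.2 (fun x => x.1) true).map (fun x => x.2))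

-- ===== PORT B =====
def split_class_alt (class_cnts : List Int) (many_shot_thr : Int) : List Int × List Int :=
  -- order = sorted(enumerate(class_cnts), key=lambda p: p[1], reverse=True)
  let order := PySem.List.sorted (PySem.List.enumerate class_cnts 0) (fun p => p.2) true
  ((order.filter (fun p => decide (p.2 > many_shot_thr))).map (fun p => p.1),
   (order.filter (fun p => decide (p.2 ≤ many_shot_thr))).map (fun p => p.1))

-- ===== PRECONDITION & SPEC =====
def Spec_split_class (class_cnts : List Int) (many_shot_thr : Int) (out : List Int × List Int) : Prop := out = split_class_alt class_cnts many_shot_thr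
instance (class_cnts : List Int) (many_shot_thr : Int) (out : List Int × List Int) : Decidable (Spec_split_class class_cnts many_shot_thr out) := by unfold Spec_split_class; infer_instance

-- ===== CLAIM (what is proved, stated in full; the proofs are below) =====
def Claim_equal_split_class : Prop := ∀ (class_cnts : List Int) (many_shot_thr : Int), Dom_split_class class_cnts many_shot_thr → Spec_split_class class_cnts many_shot_thr (split_class class_cnts many_shot_thr)

-- ===== LEMMAS AND PROOFS =====

-- A's loop: the pair of accumulators is (filter (> thr) mapped to (cnt,i), filter (≤ thr) mapped to (cnt,i)).
theorem split_fold_char (thr : Int) (l : List (Int × Int))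
    (a1 a2 : List (Int × Int)) :
    l.foldl (fun (s : List (Int × Int) × List (Int × Int)) p =>
      if p.2 > thr then (s.1 ++ [(p.2, p.1)], s.2) else (s.1, s.2 ++ [(p.2, p.1)])) (a1, a2)
    = (a1 ++ (l.filter (fun p => decide (p.2 > thr))).map (fun p => (p.2, p.1)),
       a2 ++ (l.filter (fun p => decide (p.2 ≤ thr))).map (fun p => (p.2, p.1))) := by
  induction l generalizing a1 a2 with
  | nil => simp
  | cons x t ih =>
    by_cases h : x.2 > thr
    · simp [List.foldl_cons, h, ih, not_le.mpr h]
    · simp [List.foldl_cons, h, ih, not_lt.mp h]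

-- insertBy commutes with map when the key is composed accordingly.
theorem insertBy_map {α β κ : Type} [LinearOrder κ] (f : α → β) (key : β → κ)
    (x : α) (acc : List α) :
    PySem.List.insertBy (fun a b => decide (key b < key a)) (f x) (acc.map f)
    = (PySem.List.insertBy (fun a b => decide (key (f b) < key (f a))) x acc).map f := by
  induction acc with
  | nil => simp [PySem.List.insertBy]
  | cons y t ih =>
    by_cases h : key (f y) < key (f x)
    · simp [PySem.List.insertBy, h]
    · simp [PySem.List.insertBy, h, ih]

-- sorted over a mapped list = map of sorted with the composed key.
theorem sorted_map {α β κ : Type} [LinearOrder κ] (f : α → β) (key : β → κ) (xs : List α) :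
    PySem.List.sorted (xs.map f) key true
    = (PySem.List.sorted xs (fun a => key (f a)) true).map f := by
  rw [PySem.List.sorted_rev_eq_foldl_insertBy, PySem.List.sorted_rev_eq_foldl_insertBy]
  suffices h : ∀ acc : List α,
      (xs.map f).foldl (fun acc x => PySem.List.insertBy (fun a b => decide (key b < key a)) x acc) (acc.map f)
      = (xs.foldl (fun acc x => PySem.List.insertBy (fun a b => decide (key (f b) < key (f a))) x acc) acc).map f by
    simpa using h []
  induction xs with
  | nil => intro acc; simp
  | cons x t ih =>
    intro acc
    simp only [List.map_cons, List.foldl_cons]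
    rw [insertBy_map f key x acc, ih]

-- inserting into a list whose head (if any) has key < key x just prepends x.
theorem insertBy_eq_cons {α κ : Type} [LinearOrder κ] (key : α → κ) (x : α) (l : List α)
    (h : ∀ z ∈ l.head?, key z < key x) :
    PySem.List.insertBy (fun a b => decide (key b < key a)) x l = x :: l := by
  cases l with
  | nil => simp [PySem.List.insertBy]
  | cons z t => simp [PySem.List.insertBy, h z (by simp)]

-- filtering commutes with a single insertion into a key-descending list.
theorem filter_insertBy {α κ : Type} [LinearOrder κ] (key : α → κ) (p : α → Bool)
    (x : α) (acc : List α) (hs : acc.Pairwise (fun a b => key b ≤ key a)) :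
    (PySem.List.insertBy (fun a b => decide (key b < key a)) x acc).filter p
    = if p x then PySem.List.insertBy (fun a b => decide (key b < key a)) x (acc.filter p)
      else acc.filter p := by
  induction acc with
  | nil => cases hpx : p x <;> simp [PySem.List.insertBy, hpx]
  | cons y t ih =>
    rcases List.pairwise_cons.mp hs with ⟨hy, ht⟩
    by_cases h : key y < key x
    · -- x is inserted in front of y :: t
      have hfy : ∀ z ∈ (List.filter p (y :: t)).head?, key z < key x := by
        intro z hz
        have hz' : z ∈ List.filter p (y :: t) := List.mem_of_mem_head? hz
        have hzm : z ∈ y :: t := List.mem_of_mem_filter hz'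
        rcases List.mem_cons.mp hzm with rfl | hzt
        · exact h
        · exact lt_of_le_of_lt (hy z hzt) h
      have hins : PySem.List.insertBy (fun a b => decide (key b < key a)) x (y :: t) = x :: y :: t := by
        simp [PySem.List.insertBy, h]
      rw [hins]
      cases hpx : p x
      · simp [List.filter_cons, hpx]
      · rw [List.filter_cons, hpx]
        simp only [if_pos]
        exact (insertBy_eq_cons key x _ hfy).symm
    · -- x goes somewhere in t
      rw [PySem.List.insertBy]
      simp only [decide_eq_true_eq, h, if_false]
      cases hpy : p y
      · simpa [List.filter_cons, hpy] using ih ht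
      · simp only [List.filter_cons, hpy]
        rw [ih ht]
        cases hpx : p x
        · simp
        · simp only [if_pos]
          rw [PySem.List.insertBy]
          simp [h]

-- a stable reverse sort commutes with any filter.
theorem filter_sorted {α κ : Type} [LinearOrder κ] (key : α → κ) (p : α → Bool) (xs : List α) :
    (PySem.List.sorted xs key true).filter p = PySem.List.sorted (xs.filter p) key true := by
  suffices h : ∀ ys : List α,
      (xs.foldl (fun acc x => PySem.List.insertBy (fun a b => decide (key b < key a)) x acc)
        (PySem.List.sorted ys key true)).filter p
      = (xs.filter p).foldl (fun acc x => PySem.List.insertBy (fun a b => decide (key b < key a)) x acc)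
        ((PySem.List.sorted ys key true).filter p) by
    have h0 := h []
    simpa [PySem.List.sorted_rev_eq_foldl_insertBy] using h0
  induction xs with
  | nil => intro ys; simp
  | cons x t ih =>
    intro ys
    have h2 : PySem.List.sorted (ys ++ [x]) key true
        = PySem.List.insertBy (fun a b => decide (key b < key a)) x (PySem.List.sorted ys key true) := by
      rw [PySem.List.sorted_rev_eq_foldl_insertBy, PySem.List.sorted_rev_eq_foldl_insertBy,
        List.foldl_append]
      simp
    have h3 : (PySem.List.sorted (ys ++ [x]) key true).filter p
        = if p x then PySem.List.insertBy (fun a b => decide (key b < key a)) x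
            ((PySem.List.sorted ys key true).filter p)
          else (PySem.List.sorted ys key true).filter p := by
      rw [h2, filter_insertBy key p x _ (PySem.List.sorted_pairwise_rev ys key)]
    have h4 := ih (ys ++ [x])
    rw [h2] at h4
    rw [h2] at h3
    simp only [List.foldl_cons]
    rw [h4, h3]
    cases hpx : p x
    · simp [hpx]
    · simp [hpx]

-- ===== VERDICT (by name: the statement is the Claim_ definition above) =====
theorem split_class_spec : Claim_equal_split_class := by
  intro cc thr _
  unfold Spec_split_class split_class split_class_alt
  rw [split_fold_char]
  simp only [List.nil_append]
  simp only [Prod.mk.injEq]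
  constructor <;>
  · rw [sorted_map (fun p : Int × Int => (p.2, p.1)) (fun x : Int × Int => x.1),
      show (fun a : Int × Int => ((a.2, a.1) : Int × Int).1) = (fun a : Int × Int => a.2) from rfl,
      ← filter_sorted]
    simp [List.map_map, Function.comp_def]
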